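-- pv_equiv track=rewrite | github.com/Nemeca99/AIOS | docs/archive/config/systems/Systems_Refactored/Consciousness/ava_consciousness_engine.py | _extract_learning_points
-- ===== SOURCE A (Python) =====
-- from typing import Dict, List, Optional, Tuple, Any
--
-- def _extract_learning_points(user_input: str) -> List[str]:
--     """Extract learning points from user input"""
--     learning_points = []
--     input_lower = user_input.lower()
--
--     # Learn about user preferences
--     if any(word in input_lower for word in ["like", "prefer", "enjoy", "love"]):
--         learning_points.append("User preference identified")
--
--     # Learn about user emotions
--     if any(word in input_lower for word in ["angry", "sad", "happy", "frustrated"]):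
--         learning_points.append("User emotional state detected")
--
--     # Learn about user interests
--     if any(word in input_lower for word in ["code", "philosophy", "bdsm", "art", "science"]):
--         learning_points.append("User interest area identified")
--
--     return learning_points
-- ===== SOURCE B (Python) =====
-- WORDS_PREF = ("like", "prefer", "enjoy", "love")
-- WORDS_EMO = ("angry", "sad", "happy", "frustrated")
-- WORDS_INT = ("code", "philosophy", "bdsm", "art", "science")
--
-- def _extract_learning_points(user_input: str):
--     """Single left-to-right scan: at each position of the lowered input, test
--     whether any keyword starts there, accumulating three flags."""
--     low = user_input.lower()
--     pref = emo = intr = False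
--     for i in range(len(low)):
--         pref = pref or any(low.startswith(w, i) for w in WORDS_PREF)
--         emo = emo or any(low.startswith(w, i) for w in WORDS_EMO)
--         intr = intr or any(low.startswith(w, i) for w in WORDS_INT)
--     out = []
--     if pref:
--         out.append("User preference identified")
--     if emo:
--         out.append("User emotional state detected")
--     if intr:
--         out.append("User interest area identified")
--     return out
-- ===== Notes on version B (the rewrite author's own statement) =====
-- stated objective: alternative
-- what changed: Replaced A's three per-word whole-string substring searches with a single left-to-right scan over character positions that tests keyword prefixes at each position and accumulates three flags.
import Mathlib
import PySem

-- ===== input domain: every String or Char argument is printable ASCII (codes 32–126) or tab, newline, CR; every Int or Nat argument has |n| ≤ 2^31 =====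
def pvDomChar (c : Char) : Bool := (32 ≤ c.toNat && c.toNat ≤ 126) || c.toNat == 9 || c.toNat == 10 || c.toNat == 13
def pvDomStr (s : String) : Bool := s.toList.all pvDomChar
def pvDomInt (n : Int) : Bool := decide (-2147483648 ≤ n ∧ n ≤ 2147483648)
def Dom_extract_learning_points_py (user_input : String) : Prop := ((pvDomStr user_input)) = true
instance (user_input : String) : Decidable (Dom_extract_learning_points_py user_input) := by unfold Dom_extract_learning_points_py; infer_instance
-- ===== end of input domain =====

-- B replaces A's per-word whole-string substring searches by a single left-to-right
-- positional scan accumulating three flags (objective: alternative).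

-- ===== PORT A =====
def extract_learning_points_py (user_input : String) : List String :=
  let learning_points : List String := []
  let input_lower := PySem.Str.lower user_input
  let learning_points :=
    if (["like", "prefer", "enjoy", "love"].any (fun word => PySem.Str.isIn word input_lower)) then
      learning_points ++ ["User preference identified"] else learning_points
  let learning_points :=
    if (["angry", "sad", "happy", "frustrated"].any (fun word => PySem.Str.isIn word input_lower)) then
      learning_points ++ ["User emotional state detected"] else learning_points
  let learning_points :=
    if (["code", "philosophy", "bdsm", "art", "science"].any (fun word => PySem.Str.isIn word input_lower)) then
      learning_points ++ ["User interest area identified"] else learning_points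
  learning_points

-- ===== PORT B =====
def pvWordsPref : List String := ["like", "prefer", "enjoy", "love"]
def pvWordsEmo : List String := ["angry", "sad", "happy", "frustrated"]
def pvWordsInt : List String := ["code", "philosophy", "bdsm", "art", "science"]

-- low.startswith(w, i) for 0 ≤ i ≤ len(low): exact as prefix test on the i-suffix
def pvStartsAt (low : List Char) (i : Nat) (w : String) : Bool :=
  PySem.Chars.startswith (low.drop i) w.toList

def extract_learning_points_py_alt (user_input : String) : List String :=
  let low := (PySem.Str.lower user_input).toList
  let flags := (List.range low.length).foldl
    (fun (st : Bool × Bool × Bool) i =>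
      (st.1 || pvWordsPref.any (pvStartsAt low i),
       st.2.1 || pvWordsEmo.any (pvStartsAt low i),
       st.2.2 || pvWordsInt.any (pvStartsAt low i)))
    (false, false, false)
  (if flags.1 then ["User preference identified"] else []) ++
  (if flags.2.1 then ["User emotional state detected"] else []) ++
  (if flags.2.2 then ["User interest area identified"] else [])

-- ===== PRECONDITION & SPEC =====
def Spec_extract_learning_points_py (user_input : String) (out : List String) : Prop := out = extract_learning_points_py_alt user_input
instance (user_input : String) (out : List String) : Decidable (Spec_extract_learning_points_py user_input out) := by unfold Spec_extract_learning_points_py; infer_instance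

-- ===== CLAIM (what is proved, stated in full; the proofs are below) =====
def Claim_equal_extract_learning_points_py : Prop := ∀ (user_input : String), Dom_extract_learning_points_py user_input → Spec_extract_learning_points_py user_input (extract_learning_points_py user_input)

-- ===== LEMMAS AND PROOFS =====

-- the triple or-fold computes the three `any`s over the index list
theorem pv_foldl_or3 (p1 p2 p3 : Nat → Bool) (l : List Nat) (b1 b2 b3 : Bool) :
    l.foldl (fun (st : Bool × Bool × Bool) i =>
        (st.1 || p1 i, st.2.1 || p2 i, st.2.2 || p3 i)) (b1, b2, b3)
      = (b1 || l.any p1, b2 || l.any p2, b3 || l.any p3) := by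
  induction l generalizing b1 b2 b3 with
  | nil => simp
  | cons x xs ih => simp [List.foldl_cons, ih, Bool.or_assoc]

-- a nonempty word starts at some scanned position iff it is a substring
theorem pv_scan_isIn (low w : List Char) (hw : w ≠ []) :
    ((List.range low.length).any (fun i => PySem.Chars.startswith (low.drop i) w))
      = PySem.Chars.isIn w low := by
  rcases h : PySem.Chars.isIn w low with _ | _
  · rw [List.any_eq_false]
    intro i _
    simp only [← Bool.not_eq_true] at *
    intro hs
    rw [PySem.Chars.startswith_iff] at hs
    have : ∃ j, w <+: low.drop j := ⟨i, hs⟩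
    rw [PySem.Chars.exists_prefix_drop_iff_isIn] at this
    simp [h] at this
  · rw [← PySem.Chars.exists_prefix_drop_iff_isIn] at h
    obtain ⟨j, hj⟩ := h
    rw [List.any_eq_true]
    have hjlt : j < low.length := by
      by_contra hge
      push Not at hge
      rw [List.drop_eq_nil_of_le hge] at hj
      exact hw (List.prefix_nil.mp hj)
    exact ⟨j, List.mem_range.mpr hjlt, (PySem.Chars.startswith_iff _ _).mpr hj⟩

-- flag for a concrete word list equals A's any-isIn test
theorem pv_any_scan (low : List Char) (ws : List String) (hw : ∀ w ∈ ws, w.toList ≠ []) :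
    ((List.range low.length).any (fun i => ws.any (pvStartsAt low i)))
      = ws.any (fun w => PySem.Chars.isIn w.toList low) := by
  have swap : ((List.range low.length).any (fun i => ws.any (pvStartsAt low i)))
      = ws.any (fun w => (List.range low.length).any (fun i => pvStartsAt low i w)) := by
    rw [Bool.eq_iff_iff]
    simp only [List.any_eq_true]
    constructor <;> rintro ⟨x, hx, y, hy, h⟩ <;> exact ⟨y, hy, x, hx, h⟩
  rw [swap]
  clear swap
  simp only [pvStartsAt]
  induction ws with
  | nil => rfl
  | cons w t ih =>
      simp only [List.any_cons]
      rw [pv_scan_isIn low w.toList (hw w (by simp)),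
          ih (fun x hx => hw x (by simp [hx]))]

-- ===== VERDICT (by name: the statement is the Claim_ definition above) =====
theorem extract_learning_points_py_spec : Claim_equal_extract_learning_points_py := by
  intro user_input _
  simp only [Spec_extract_learning_points_py, extract_learning_points_py,
    extract_learning_points_py_alt]
  rw [pv_foldl_or3]
  rw [pv_any_scan _ pvWordsPref (by decide), pv_any_scan _ pvWordsEmo (by decide),
      pv_any_scan _ pvWordsInt (by decide)]
  simp only [pvWordsPref, pvWordsEmo, pvWordsInt, PySem.Str.isIn_eq, Bool.false_or]
  split_ifs <;> simp
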